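-- pv_equiv track=rewrite | github.com/K-subin/Substitution-Cipher | Freq_Order_lib.py | Freq2Key
-- ===== SOURCE A (Python) =====
-- ETAOIN =  'ETAOINSHRDLCUMWFGYPBVKJXQZ' # 빈도순서
--
-- def getItemZero(items):
--     return items[0]
--
-- def Freq2Key(freq_order):
--     temp_dic = {}
--
--     # {'E':'C', 'T':'M', ...}
--     i = 0
--     for char in freq_order:
--         temp_dic[ETAOIN[i]] = char
--         i += 1
--
--     # [('E', 'C'), ...]
--     temp_list = list(temp_dic.items())
--
--     # [('A', 'P'), ('B', 'O') ...] 알파벳순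
--     temp_list.sort(key=getItemZero) #오름차순
--
--     #['P', 'O', ...]
--     temp_key_list = []
--     for item in temp_list:
--         temp_key_list.append(item[1])
--
--     return ''.join(temp_key_list)
-- ===== SOURCE B (Python) =====
-- ETAOIN = 'ETAOINSHRDLCUMWFGYPBVKJXQZ'
--
-- def Freq2Key(freq_order):
--     slots = [None] * 26
--     for i, char in enumerate(freq_order):
--         slots[ord(ETAOIN[i]) - ord('A')] = char
--     return ''.join(c for c in slots if c is not None)
-- ===== Notes on version B (the rewrite author's own statement) =====
-- stated objective: alternative
-- what changed: Replaces the dict build + comparison sort of items + value extraction by direct bucket placement of each char into a 26-slot array indexed by its ETAOIN letter, then an ordered sweep joining the filled slots.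
import Mathlib
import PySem

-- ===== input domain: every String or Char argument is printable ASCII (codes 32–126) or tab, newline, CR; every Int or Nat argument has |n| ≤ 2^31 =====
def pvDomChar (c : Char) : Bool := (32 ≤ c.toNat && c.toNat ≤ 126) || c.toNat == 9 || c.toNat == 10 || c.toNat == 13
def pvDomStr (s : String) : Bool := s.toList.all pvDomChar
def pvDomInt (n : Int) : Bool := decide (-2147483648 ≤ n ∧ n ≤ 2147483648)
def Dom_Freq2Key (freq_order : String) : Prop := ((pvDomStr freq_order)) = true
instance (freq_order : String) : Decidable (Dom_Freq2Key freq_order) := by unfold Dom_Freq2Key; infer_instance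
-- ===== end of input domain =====

-- B replaces A's dict build + comparison sort of the items by direct placement into 26 alphabet slots plus an ordered sweep.

def etaoinList : List Char :=
  ['E','T','A','O','I','N','S','H','R','D','L','C','U','M','W','F','G','Y','P','B','V','K','J','X','Q','Z']

-- ===== PORT A =====
-- for char in freq_order: temp_dic[ETAOIN[i]] = char; i += 1   (none = IndexError when i ≥ 26)
def freqLoopA : List Char → Int → PySem.Dict Char Char → Option (PySem.Dict Char Char)
  | [], _, d => some d
  | c :: rest, i, d =>
    match PySem.List.pyGet? etaoinList i with
    | none => none
    | some k => freqLoopA rest (i + 1) (d.insert k c)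

def Freq2Key (freq_order : String) : String :=
  match freqLoopA freq_order.toList 0 PySem.Dict.empty with
  | none => ""      -- unreachable under Pre_ (Python raises IndexError)
  | some d =>
    let temp_list := PySem.List.sorted d.items (fun p => p.1) false
    let temp_key_list := temp_list.foldl (fun acc item => acc ++ [item.2]) []
    String.ofList temp_key_list    -- ''.join of the one-char strings

-- ===== PORT B =====
-- for i, char in enumerate(freq_order): slots[ord(ETAOIN[i]) - ord('A')] = char
def slotsLoopB : List Char → Int → List (Option Char) → Option (List (Option Char))
  | [], _, slots => some slots
  | c :: rest, i, slots =>
    match PySem.List.pyGet? etaoinList i with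
    | none => none
    | some k => slotsLoopB rest (i + 1) (slots.set (k.toNat - 65) (some c))

def Freq2Key_alt (freq_order : String) : String :=
  match slotsLoopB freq_order.toList 0 (List.replicate 26 none) with
  | none => ""      -- unreachable under Pre_ (Python raises IndexError)
  | some slots => String.ofList (slots.filterMap id)   -- join the filled slots in alphabetical order

-- ===== PRECONDITION & SPEC =====
-- Pre_ excludes strings longer than 26, on which both Pythons raise IndexError (ETAOIN[i]).
def Pre_Freq2Key (freq_order : String) : Prop := freq_order.toList.length ≤ 26
instance (freq_order : String) : Decidable (Pre_Freq2Key freq_order) := by unfold Pre_Freq2Key; infer_instance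
def pvWitness_Freq2Key : String := "XKCD"

def Spec_Freq2Key (freq_order : String) (out : String) : Prop := out = Freq2Key_alt freq_order
instance (freq_order : String) (out : String) : Decidable (Spec_Freq2Key freq_order out) := by unfold Spec_Freq2Key; infer_instance

-- ===== CLAIM (what is proved, stated in full; the proofs are below) =====
def Claim_equal_Freq2Key : Prop := ∀ (freq_order : String), Dom_Freq2Key freq_order → Pre_Freq2Key freq_order → Spec_Freq2Key freq_order (Freq2Key freq_order)

-- ===== LEMMAS AND PROOFS =====

-- the pairs both loops traverse: (ETAOIN[i], freq_order[i])
-- the alphabetical sweep of B, as a list of pairs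
def tabM (L : List (Char × Char)) : List (Char × Char) :=
  (List.range 26).filterMap (fun j => L.find? (fun p => p.1.toNat - 65 == j))

lemma loopA_eq (cs : List Char) : ∀ (i : Nat) (d : PySem.Dict Char Char), i + cs.length ≤ 26 →
    freqLoopA cs (i : Int) d
      = some (((etaoinList.drop i).zip cs).foldl (fun d p => d.insert p.1 p.2) d) := by
  induction cs with
  | nil => intro i d _; simp [freqLoopA]
  | cons c rest ih =>
    intro i d h
    have h' : i + rest.length + 1 ≤ 26 := by simpa [Nat.add_comm, Nat.add_assoc] using h
    have hi : i < etaoinList.length := by simp only [etaoinList, List.length]; omega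
    have h1 : (i : Int) + 1 = ((i + 1 : Nat) : Int) := by push_cast; ring
    simp only [freqLoopA, PySem.List.pyGet?_natCast, List.getElem?_eq_getElem hi, h1,
      ih (i + 1) _ (by omega)]
    rw [List.drop_eq_getElem_cons hi, List.zip_cons_cons, List.foldl_cons]

lemma loopB_eq (cs : List Char) : ∀ (i : Nat) (sl : List (Option Char)), i + cs.length ≤ 26 →
    slotsLoopB cs (i : Int) sl
      = some (((etaoinList.drop i).zip cs).foldl (fun sl p => sl.set (p.1.toNat - 65) (some p.2)) sl) := by
  induction cs with
  | nil => intro i sl _; simp [slotsLoopB]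
  | cons c rest ih =>
    intro i sl h
    have h' : i + rest.length + 1 ≤ 26 := by simpa [Nat.add_comm, Nat.add_assoc] using h
    have hi : i < etaoinList.length := by simp only [etaoinList, List.length]; omega
    have h1 : (i : Int) + 1 = ((i + 1 : Nat) : Int) := by push_cast; ring
    simp only [slotsLoopB, PySem.List.pyGet?_natCast, List.getElem?_eq_getElem hi, h1,
      ih (i + 1) _ (by omega)]
    rw [List.drop_eq_getElem_cons hi, List.zip_cons_cons, List.foldl_cons]

lemma set_map_range (n k : Nat) (g : Nat → Option Char) (v : Option Char) :
    ((List.range n).map g).set k v = (List.range n).map (fun j => if j = k then v else g j) := by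
  apply List.ext_getElem <;> simp [List.getElem_set]
  intro i hi; split
  · simp_all
  · rw [if_neg (by omega)]

lemma tab_eq : ∀ (L : List (Char × Char)) (g : Nat → Option Char),
    (∀ p ∈ L, p.1.toNat - 65 < 26) → (L.map (fun p => p.1.toNat - 65)).Nodup →
    L.foldl (fun sl p => sl.set (p.1.toNat - 65) (some p.2)) ((List.range 26).map g)
      = (List.range 26).map (fun j =>
          match L.find? (fun p => p.1.toNat - 65 == j) with
          | some p => some p.2
          | none => g j) := by
  intro L
  induction L with
  | nil => intro g _ _; simp
  | cons p L' ih =>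
    intro g hlt hnd
    have hp : p.1.toNat - 65 < 26 := hlt p (by simp)
    have hnotin : (p.1.toNat - 65) ∉ L'.map (fun q => q.1.toNat - 65) := by
      simp only [List.map_cons, List.nodup_cons] at hnd; exact hnd.1
    rw [List.foldl_cons, set_map_range,
        ih _ (fun q hq => hlt q (by simp [hq]))
          (by simp only [List.map_cons, List.nodup_cons] at hnd; exact hnd.2)]
    apply List.map_congr_left
    intro j _
    by_cases hj : p.1.toNat - 65 = j
    · have hnone : L'.find? (fun q => q.1.toNat - 65 == j) = none := by
        apply List.find?_eq_none.mpr
        intro q hq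
        simp only [beq_iff_eq]
        intro hq2
        exact hnotin (by rw [hj]; exact List.mem_map.mpr ⟨q, hq, hq2⟩)
      simp [hnone, hj]
    · have hb : (p.1.toNat - 65 == j) = false := by simp [hj]
      have hj' : ¬ (j = p.1.toNat - 65) := fun hh => hj hh.symm
      simp only [List.find?_cons, hb]
      cases L'.find? (fun q => q.1.toNat - 65 == j) with
      | none => rw [if_neg hj']
      | some q => rfl

lemma etaoin_bounds : ∀ c ∈ etaoinList, 65 ≤ c.toNat ∧ c.toNat ≤ 90 := by
  have h : etaoinList.all (fun c => decide (65 ≤ c.toNat) && decide (c.toNat ≤ 90)) = true := by decide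
  intro c hc
  have := List.all_eq_true.mp h c hc
  simp at this; exact this

lemma sorted_eq_tab (L : List (Char × Char))
    (hmem : ∀ p ∈ L, p.1 ∈ etaoinList) (hnd : (L.map Prod.fst).Nodup) :
    PySem.List.sorted L (fun p => p.1) false = tabM L := by
  have hfind : ∀ j (q : Char × Char), L.find? (fun p => p.1.toNat - 65 == j) = some q →
      q ∈ L ∧ q.1.toNat - 65 = j := by
    intro j q hq
    exact ⟨List.mem_of_find?_eq_some hq, by simpa using List.find?_some hq⟩
  have hpairwise : (tabM L).Pairwise (fun a b => a.1 < b.1) := by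
    apply List.Pairwise.filterMap _ _ (List.pairwise_lt_range)
    intro j1 j2 hj x hx y hy
    obtain ⟨hx1, hx2⟩ := hfind j1 x hx
    obtain ⟨hy1, hy2⟩ := hfind j2 y hy
    have bx := etaoin_bounds _ (hmem _ hx1)
    have _by := etaoin_bounds _ (hmem _ hy1)
    have ht : x.1.toNat < y.1.toNat := by omega
    exact Char.lt_def.mpr ht
  have hndL : L.Nodup := hnd.of_map
  have hndM : (tabM L).Nodup := hpairwise.imp (fun {a b} hlt => by rintro rfl; exact lt_irrefl _ hlt)
  have hperm : (tabM L).Perm L := by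
    apply (List.perm_ext_iff_of_nodup hndM hndL).mpr
    intro a
    constructor
    · intro ha
      obtain ⟨j, _, hj⟩ := List.mem_filterMap.mp ha
      exact (hfind j a hj).1
    · intro ha
      have hb := etaoin_bounds _ (hmem _ ha)
      have hsome : (L.find? (fun p => p.1.toNat - 65 == a.1.toNat - 65)).isSome :=
        List.find?_isSome.mpr ⟨a, ha, by simp⟩
      obtain ⟨q, hq⟩ := Option.isSome_iff_exists.mp hsome
      obtain ⟨hq1, hq2⟩ := hfind _ q hq
      have hqb := etaoin_bounds _ (hmem _ hq1)
      have ht : q.1.toNat = a.1.toNat := by omega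
      have hqa : q = a := List.inj_on_of_nodup_map hnd hq1 ha (Char.ext (UInt32.toNat_inj.mp ht))
      exact List.mem_filterMap.mpr ⟨a.1.toNat - 65, by simp; omega, hqa ▸ hq⟩
  exact PySem.List.sorted_eq_of_perm_of_pairwise_lt L (tabM L) (fun p => p.1) hperm hpairwise

lemma map_fst_zip_take : ∀ (l1 l2 : List Char), (l1.zip l2).map Prod.fst = l1.take l2.length := by
  intro l1
  induction l1 with
  | nil => intro l2; simp
  | cons a l1' ih =>
    intro l2
    cases l2 with
    | nil => simp
    | cons b l2' => simp [ih]

lemma etaoin_nodup : etaoinList.Nodup := by decide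

theorem Freq2Key_spec : Claim_equal_Freq2Key := by
  intro s _ hpre
  unfold Spec_Freq2Key Freq2Key Freq2Key_alt
  have hpre' : s.toList.length ≤ 26 := hpre
  rw [show (0 : Int) = ((0 : Nat) : Int) from rfl,
      loopA_eq s.toList 0 _ (by omega), loopB_eq s.toList 0 _ (by omega)]
  simp only [List.drop_zero]
  set L := etaoinList.zip s.toList with hL
  -- facts about L
  have hfst : L.map Prod.fst = etaoinList.take s.toList.length := map_fst_zip_take _ _
  have hndfst : (L.map Prod.fst).Nodup := by
    rw [hfst]; exact (List.take_sublist _ _).nodup etaoin_nodup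
  have hmem : ∀ p ∈ L, p.1 ∈ etaoinList := fun p hp => (List.of_mem_zip hp).1
  have hlt : ∀ p ∈ L, p.1.toNat - 65 < 26 := by
    intro p hp; have := etaoin_bounds _ (hmem p hp); omega
  have hndpos : (L.map (fun p => p.1.toNat - 65)).Nodup := by
    have : (L.map (fun p => p.1.toNat - 65)) = (L.map Prod.fst).map (fun c => c.toNat - 65) := by
      simp [List.map_map]
    rw [this]
    apply hndfst.map_on
    intro x hx y hy hxy
    have hx' : x ∈ etaoinList := List.take_subset _ _ (hfst ▸ hx)
    have hy' : y ∈ etaoinList := List.take_subset _ _ (hfst ▸ hy)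
    have bx := etaoin_bounds _ hx'
    have byy := etaoin_bounds _ hy'
    have ht : x.toNat = y.toNat := by omega
    exact Char.ext (UInt32.toNat_inj.mp ht)
  -- A side: the dict's items are exactly L
  have hitems : (L.foldl (fun d p => d.insert p.1 p.2) PySem.Dict.empty).items = L := by
    have := PySem.Dict.items_foldl_insert_fresh (k := fun p : Char × Char => p.1)
      (v := fun p : Char × Char => p.2) (l := L) (d := PySem.Dict.empty)
      (by simp) (by simpa using hndfst)
    simpa using this
  -- B side: the final slots tabulate the first match per alphabet position
  rw [show (List.replicate 26 (none : Option Char)) = (List.range 26).map (fun _ => none) by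
        rw [List.map_const', List.length_range],
      tab_eq L (fun _ => none) hlt hndpos]
  simp only [hitems, sorted_eq_tab L hmem hndfst,
    PySem.List.foldl_append_singleton_eq_map]
  -- both sides are (tabM L).map (·.2)
  have hfun : ∀ j, (match L.find? (fun p => p.1.toNat - 65 == j) with
      | some p => some p.2 | none => (none : Option Char))
      = (L.find? (fun p => p.1.toNat - 65 == j)).map (fun p => p.2) := by
    intro j; cases L.find? (fun p => p.1.toNat - 65 == j) <;> rfl
  rw [List.map_congr_left (fun j _ => hfun j), List.filterMap_map]
  have : (id ∘ fun j => (L.find? (fun p => p.1.toNat - 65 == j)).map (fun p => p.2))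
      = fun j => (L.find? (fun p => p.1.toNat - 65 == j)).map (fun p => p.2) := rfl
  rw [this, ← List.map_filterMap]
  rfl
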